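-- pv_equiv track=rewrite | github.com/Juanj098/LFP_Proyecto2_201900532 | lexico/Lexico.py | F_comentario
-- ===== SOURCE A (Python) =====
-- def F_comentario(cadena):
--     lexema = ''
--     puntero = ''
--     for char in cadena:
--         puntero += char
--         if char != '-' and char!='/' and char != '*' :
--             return lexema
--         else:
--             lexema+=char
-- ===== SOURCE B (Python) =====
-- def F_comentario(cadena):
--     stripped = cadena.lstrip('-/*')
--     if stripped:
--         return cadena[:len(cadena) - len(stripped)]
--     return None
-- ===== Notes on version B (the rewrite author's own statement) =====
-- stated objective: simpler
-- what changed: Replaces the char-by-char accumulate-and-early-return loop with a single str.lstrip over the comment-symbol characters, then returns the stripped prefix only if a non-symbol char remains (else None).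
import Mathlib
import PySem

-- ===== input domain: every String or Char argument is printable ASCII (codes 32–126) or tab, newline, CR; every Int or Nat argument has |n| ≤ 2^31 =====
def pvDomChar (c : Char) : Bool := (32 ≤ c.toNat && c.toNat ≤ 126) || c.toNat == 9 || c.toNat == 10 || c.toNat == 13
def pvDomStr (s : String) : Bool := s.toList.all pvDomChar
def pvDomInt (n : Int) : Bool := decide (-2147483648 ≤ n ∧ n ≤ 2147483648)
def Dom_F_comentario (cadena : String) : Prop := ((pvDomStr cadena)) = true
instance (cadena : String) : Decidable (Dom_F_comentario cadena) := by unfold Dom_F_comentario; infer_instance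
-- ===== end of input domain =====

-- B replaces A's accumulate-and-early-return loop with one lstrip over the comment-symbol chars then a prefix slice (objective: simpler).

-- ===== PORT A =====
-- loop state: lexema and puntero as List Char accumulators (appended back-to-front order preserved via ++ [c]);
-- implicit fall-off-the-end return is none
def pvGoA (l : List Char) (lexema puntero : List Char) : Option String :=
  match l with
  | [] => none
  | c :: rest =>
    let puntero := puntero ++ [c]
    if c ≠ '-' ∧ c ≠ '/' ∧ c ≠ '*' then some (String.ofList lexema)
    else pvGoA rest (lexema ++ [c]) puntero

def F_comentario (cadena : String) : Option String :=
  pvGoA cadena.toList [] []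

-- ===== PORT B =====
-- lstrip over the symbol set is exact: drop the longest prefix of chars in {'-','/','*'}
def F_comentario_alt (cadena : String) : Option String :=
  let l := cadena.toList
  let stripped := l.dropWhile (fun c => c = '-' ∨ c = '/' ∨ c = '*')
  if stripped ≠ [] then some (String.ofList (l.take (l.length - stripped.length)))
  else none

-- ===== PRECONDITION & SPEC =====
def Spec_F_comentario (cadena : String) (out : Option String) : Prop := out = F_comentario_alt cadena
instance (cadena : String) (out : Option String) : Decidable (Spec_F_comentario cadena out) := by unfold Spec_F_comentario; infer_instance

-- ===== CLAIM (what is proved, stated in full; the proofs are below) =====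
def Claim_equal_F_comentario : Prop := ∀ (cadena : String), Dom_F_comentario cadena → Spec_F_comentario cadena (F_comentario cadena)

-- ===== LEMMAS AND PROOFS =====

theorem pvGoA_eq (l : List Char) (acc punt : List Char) :
    pvGoA l acc punt =
      if (l.dropWhile (fun c => c = '-' ∨ c = '/' ∨ c = '*')) ≠ [] then
        some (String.ofList (acc ++ l.takeWhile (fun c => c = '-' ∨ c = '/' ∨ c = '*')))
      else none := by
  induction l generalizing acc punt with
  | nil => simp [pvGoA]
  | cons c rest ih =>
    by_cases h : c = '-' ∨ c = '/' ∨ c = '*'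
    · have hd : decide (c = '-' ∨ c = '/' ∨ c = '*') = true := by simpa using h
      simp only [pvGoA, List.dropWhile_cons, List.takeWhile_cons, hd, if_true]
      have hc : ¬ (c ≠ '-' ∧ c ≠ '/' ∧ c ≠ '*') := by tauto
      rw [if_neg hc, ih]
      by_cases he : rest.dropWhile (fun c => c = '-' ∨ c = '/' ∨ c = '*') = []
      · simp
      · simp
    · have hd : decide (c = '-' ∨ c = '/' ∨ c = '*') = false := by simpa using h
      simp only [pvGoA, List.dropWhile_cons, List.takeWhile_cons, hd]
      have hc : c ≠ '-' ∧ c ≠ '/' ∧ c ≠ '*' := by tauto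
      simp [hc]

theorem take_sub_dropWhile (l : List Char) (p : Char → Bool) :
    l.take (l.length - (l.dropWhile p).length) = l.takeWhile p := by
  have h := List.takeWhile_append_dropWhile (p := p) (l := l)
  have hlen : (List.takeWhile p l).length + (List.dropWhile p l).length = l.length := by
    rw [← List.length_append, h]
  have heq : l.length - (List.dropWhile p l).length = (List.takeWhile p l).length := by omega
  rw [heq]
  obtain ⟨t, ht⟩ := List.takeWhile_prefix (l := l) p
  nth_rewrite 2 [← ht]
  exact List.take_left

-- ===== VERDICT (by name: the statement is the Claim_ definition above) =====
theorem F_comentario_spec : Claim_equal_F_comentario := by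
  intro cadena _
  unfold Spec_F_comentario F_comentario F_comentario_alt
  rw [pvGoA_eq]
  simp only [List.nil_append]
  rw [take_sub_dropWhile cadena.toList (fun c => decide (c = '-' ∨ c = '/' ∨ c = '*'))]
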